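-- pv_equiv track=rewrite | github.com/Pranav2004/Lotto-Maxi-number-predictor | Lotto-Maxi-number-predictor-main/lotto_max_analyzer/analysis/patterns.py | _find_consecutive_sequences
-- ===== SOURCE A (Python) =====
-- from collections import Counter, defaultdict
-- from typing import Dict, List, Tuple, Optional
--
-- def _find_consecutive_sequences(sorted_numbers: List[int]) -> Dict[int, List[List[int]]]:
--     """Find all consecutive sequences in a sorted list of numbers."""
--     sequences = defaultdict(list)
--
--     i = 0
--     while i < len(sorted_numbers):
--         current_seq = [sorted_numbers[i]]
--         j = i + 1
--
--         # Extend the sequence as long as numbers are consecutive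
--         while j < len(sorted_numbers) and sorted_numbers[j] == sorted_numbers[j-1] + 1:
--             current_seq.append(sorted_numbers[j])
--             j += 1
--
--         # If sequence has 2 or more numbers, record it
--         if len(current_seq) >= 2:
--             sequences[len(current_seq)].append(current_seq)
--
--         i = j if j > i + 1 else i + 1
--
--     return sequences
-- ===== SOURCE B (Python) =====
-- from collections import defaultdict
-- from typing import Dict, List
--
--
-- def _find_consecutive_sequences(sorted_numbers: List[int]) -> Dict[int, List[List[int]]]:
--     """Staged approach: compute all run boundaries first, then slice out the runs."""
--     sequences = defaultdict(list)
--     n = len(sorted_numbers)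
--     if n == 0:
--         return sequences
--     # Pass 1: indices where a new maximal run begins, plus both ends.
--     breaks = [0] + [i for i in range(1, n) if sorted_numbers[i] != sorted_numbers[i - 1] + 1] + [n]
--     # Pass 2: slice each run out of the list and file it by its length.
--     for start, end in zip(breaks, breaks[1:]):
--         if end - start >= 2:
--             sequences[end - start].append(sorted_numbers[start:end])
--     return sequences
-- ===== Notes on version B (the rewrite author's own statement) =====
-- stated objective: alternative
-- what changed: Replaces A's stateful nested while loops (index jumping while extending the current run) by two staged passes: first compute the full list of run-boundary indices with a range comprehension, then slice each maximal run out of the list with zip over adjacent boundaries and file it by length.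
import Mathlib
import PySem

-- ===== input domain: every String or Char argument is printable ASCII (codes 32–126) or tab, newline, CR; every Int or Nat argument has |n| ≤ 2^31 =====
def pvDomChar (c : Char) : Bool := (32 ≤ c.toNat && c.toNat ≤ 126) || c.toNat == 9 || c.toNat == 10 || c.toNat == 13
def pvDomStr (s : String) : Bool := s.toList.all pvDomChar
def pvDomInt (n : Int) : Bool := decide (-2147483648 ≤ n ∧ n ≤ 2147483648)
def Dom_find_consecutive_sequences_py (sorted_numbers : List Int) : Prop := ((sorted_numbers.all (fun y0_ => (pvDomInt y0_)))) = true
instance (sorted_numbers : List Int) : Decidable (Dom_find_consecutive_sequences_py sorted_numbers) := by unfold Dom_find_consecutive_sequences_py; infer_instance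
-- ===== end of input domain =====

-- B replaces A's stateful nested while loops by two staged passes: first compute every
-- run boundary index, then slice each run out of the list (objective: alternative).

-- ===== PORT A =====
-- inner while loop: extend the current sequence while numbers are consecutive
-- (indices j, j-1 are always in range when read, so getD is exact here)
def innerA (s : List Int) (j : Nat) (acc : List Int) : Nat × List Int :=
  if _h : j < s.length ∧ s.getD j 0 = s.getD (j-1) 0 + 1 then
    innerA s (j+1) (acc ++ [s.getD j 0])
  else (j, acc)
termination_by s.length - j
decreasing_by omega

-- outer while loop over i
def outerA (s : List Int) (i : Nat) (seqs : PySem.Dict Int (List (List Int))) :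
    PySem.Dict Int (List (List Int)) :=
  if h : i < s.length then
    let r := innerA s (i+1) [s.getD i 0]
    let seqs' := if 2 ≤ r.2.length then seqs.modify (r.2.length : Int) [] (· ++ [r.2]) else seqs
    if h2 : i + 1 < r.1 then outerA s r.1 seqs' else outerA s (i+1) seqs'
  else seqs
termination_by s.length - i
decreasing_by
  · simp only [r] at h2 ⊢; omega
  · omega

def find_consecutive_sequences_py (sorted_numbers : List Int) : List (Int × List (List Int)) :=
  (outerA sorted_numbers 0 PySem.Dict.empty).items

-- ===== PORT B =====
-- Source B: breaks = [0] + [i for i in range(1, n) if a[i] != a[i-1] + 1] + [n]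
-- (every index i read satisfies 1 ≤ i < n, so getD with Nat indices is exact here)
def breaksB (s : List Int) : List Nat :=
  0 :: (((List.range' 1 (s.length - 1)).filter
          (fun i => s.getD i 0 ≠ s.getD (i-1) 0 + 1)) ++ [s.length])

-- Source B: for start, end in zip(breaks, breaks[1:]): …
-- (0 ≤ start ≤ end ≤ n, so the slice a[start:end] is exactly (drop start).take (end-start))
def find_consecutive_sequences_py_alt (sorted_numbers : List Int) : List (Int × List (List Int)) :=
  if sorted_numbers.length = 0 then (PySem.Dict.empty : PySem.Dict Int (List (List Int))).items
  else
    let breaks := breaksB sorted_numbers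
    ((breaks.zip breaks.tail).foldl
      (fun d p =>
        if 2 ≤ p.2 - p.1 then
          d.modify ((p.2 - p.1 : Nat) : Int) []
            (· ++ [(sorted_numbers.drop p.1).take (p.2 - p.1)])
        else d)
      PySem.Dict.empty).items

-- ===== PRECONDITION & SPEC =====
def Spec_find_consecutive_sequences_py (sorted_numbers : List Int) (out : List (Int × List (List Int))) : Prop := out = find_consecutive_sequences_py_alt sorted_numbers
instance (sorted_numbers : List Int) (out : List (Int × List (List Int))) : Decidable (Spec_find_consecutive_sequences_py sorted_numbers out) := by unfold Spec_find_consecutive_sequences_py; infer_instance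

-- ===== CLAIM (what is proved, stated in full; the proofs are below) =====
def Claim_equal_find_consecutive_sequences_py : Prop := ∀ (sorted_numbers : List Int), Dom_find_consecutive_sequences_py sorted_numbers → Spec_find_consecutive_sequences_py sorted_numbers (find_consecutive_sequences_py sorted_numbers)

-- ===== LEMMAS AND PROOFS =====

-- the maximal chain of consecutive successors of prev at the front of the list
def chainA (prev : Int) : List Int → List Int
  | [] => []
  | y :: ys => if y = prev + 1 then y :: chainA y ys else []

-- reference: the maximal runs of the suffix starting at index idx
def runsR (idx : Nat) : List Int → List (List Int)
  | [] => []
  | x :: xs =>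
    (x :: chainA x xs) ::
      runsR (idx + 1 + (chainA x xs).length) (xs.drop (chainA x xs).length)
termination_by l => l.length
decreasing_by simp

-- the common fold step both programs reduce to
def stepR (d : PySem.Dict Int (List (List Int))) (r : List Int) : PySem.Dict Int (List (List Int)) :=
  if 2 ≤ r.length then d.modify (r.length : Int) [] (· ++ [r]) else d

lemma runsR_nil (idx : Nat) : runsR idx [] = [] := by rw [runsR.eq_def]

lemma runsR_cons (idx : Nat) (x : Int) (xs : List Int) :
    runsR idx (x :: xs) =
      (x :: chainA x xs) ::
        runsR (idx + 1 + (chainA x xs).length) (xs.drop (chainA x xs).length) := by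
  rw [runsR.eq_def]

lemma chainA_length_le (prev : Int) (l : List Int) :
    (chainA prev l).length ≤ l.length := by
  induction l generalizing prev with
  | nil => simp [chainA]
  | cons y ys ih =>
    simp only [chainA]
    split_ifs
    · simpa using ih y
    · simp

lemma chainA_prefix (prev : Int) (l : List Int) :
    chainA prev l = l.take (chainA prev l).length := by
  induction l generalizing prev with
  | nil => simp [chainA]
  | cons y ys ih =>
    simp only [chainA]
    split_ifs with h
    · simp [List.take_succ_cons, ← ih y]
    · simp

lemma innerA_eq (s : List Int) (j : Nat) (acc : List Int) :
    innerA s j acc =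
      (j + (chainA (s.getD (j-1) 0) (s.drop j)).length,
       acc ++ chainA (s.getD (j-1) 0) (s.drop j)) := by
  fun_induction innerA s j acc with
  | case1 j acc h ih =>
    obtain ⟨hj, hc⟩ := h
    have e1 : s.getD j 0 = s[j] := List.getD_eq_getElem s 0 hj
    rw [ih, List.drop_eq_getElem_cons hj]
    simp only [chainA]
    rw [if_pos (by rw [← e1]; exact hc)]
    rw [show (j + 1) - 1 = j by omega, e1]
    simp
    omega
  | case2 j acc h =>
    by_cases hj : j < s.length
    · have hc : ¬ s.getD j 0 = s.getD (j-1) 0 + 1 := fun hc => h ⟨hj, hc⟩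
      have e1 : s.getD j 0 = s[j] := List.getD_eq_getElem s 0 hj
      rw [List.drop_eq_getElem_cons hj]
      simp only [chainA]
      rw [if_neg (by rw [← e1]; exact hc)]
      simp
    · rw [List.drop_eq_nil_of_le (by omega)]
      simp [chainA]

lemma outerA_eq (s : List Int) (i : Nat) (seqs : PySem.Dict Int (List (List Int))) :
    outerA s i seqs = (runsR i (s.drop i)).foldl stepR seqs := by
  fun_induction outerA s i seqs with
  | case1 i seqs h r seqs' h2 ih =>
    have e1 : s.getD i 0 = s[i] := List.getD_eq_getElem s 0 h
    have hr : r = (i + 1 + (chainA s[i] (s.drop (i+1))).length,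
        s[i] :: chainA s[i] (s.drop (i+1))) := by
      show innerA s (i+1) [s.getD i 0] = _
      rw [innerA_eq, show (i + 1) - 1 = i by omega, e1]
      simp
    rw [ih, List.drop_eq_getElem_cons h, runsR_cons, List.foldl_cons]
    rw [List.drop_drop]
    simp only [seqs', hr, stepR]
    congr 2
  | case2 i seqs h r seqs' h2 ih =>
    have e1 : s.getD i 0 = s[i] := List.getD_eq_getElem s 0 h
    have hr : r = (i + 1 + (chainA s[i] (s.drop (i+1))).length,
        s[i] :: chainA s[i] (s.drop (i+1))) := by
      show innerA s (i+1) [s.getD i 0] = _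
      rw [innerA_eq, show (i + 1) - 1 = i by omega, e1]
      simp
    have hL : (chainA s[i] (s.drop (i+1))).length = 0 := by
      by_contra hne
      exact h2 (by rw [hr]; simp; omega)
    have hch : chainA s[i] (s.drop (i+1)) = [] := List.length_eq_zero_iff.mp hL
    rw [ih, List.drop_eq_getElem_cons h, runsR_cons, List.foldl_cons]
    simp only [seqs', hr, hch, stepR]
    congr 2
  | case3 i seqs h =>
    rw [List.drop_eq_nil_of_le (by omega), runsR_nil]
    simp

-- the filtered break list from position i+1 on
def brk (s : List Int) (i : Nat) : List Nat :=
  ((List.range' (i+1) (s.length - (i+1))).filter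
    (fun j => s.getD j 0 ≠ s.getD (j-1) 0 + 1)) ++ [s.length]

lemma getD_of_drop (s : List Int) (i : Nat) (x : Int) (xs : List Int)
    (h : s.drop i = x :: xs) : s.getD i 0 = x := by
  have h1 : s[i]? = some x := by rw [← List.head?_drop, h]; rfl
  simp [List.getD_eq_getElem?_getD, h1]

lemma drop_succ_of_drop (s : List Int) (i : Nat) (x : Int) (xs : List Int)
    (h : s.drop i = x :: xs) : s.drop (i+1) = xs := by
  have := congrArg List.tail h
  simpa [List.tail_drop] using this

lemma brk_eq (xs : List Int) : ∀ (s : List Int) (i : Nat) (x : Int),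
    s.drop i = x :: xs →
    brk s i = if i + 1 + (chainA x xs).length < s.length
              then (i + 1 + (chainA x xs).length) :: brk s (i + 1 + (chainA x xs).length)
              else [s.length] := by
  induction xs with
  | nil =>
    intro s i x h
    have hlen : s.length = i + 1 := by
      have := congrArg List.length h
      simp at this
      omega
    simp [brk, chainA, hlen]
  | cons y ys ih =>
    intro s i x h
    have hx : s.getD i 0 = x := getD_of_drop s i x _ h
    have hdx : s.drop (i+1) = y :: ys := drop_succ_of_drop s i x _ h
    have hy : s.getD (i+1) 0 = y := getD_of_drop s (i+1) y ys hdx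
    have hlen : i + 2 ≤ s.length := by
      have := congrArg List.length hdx
      simp at this
      omega
    have hrange : List.range' (i+1) (s.length - (i+1)) =
        (i+1) :: List.range' (i+2) (s.length - (i+2)) := by
      rw [show s.length - (i+1) = (s.length - (i+2)) + 1 by omega, List.range'_succ]
    by_cases hc : y = x + 1
    · -- consecutive: i+1 is not a break; recurse one step along the chain
      have hP : ¬ (s.getD (i+1) 0 ≠ s.getD ((i+1)-1) 0 + 1) := by
        rw [show i + 1 - 1 = i by omega, hy, hx]
        simp [hc]
      have step : brk s i = brk s (i+1) := by
        simp only [brk, hrange, List.filter_cons]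
        rw [if_neg (by simpa using hP)]
      rw [step, ih s (i+1) y hdx]
      simp only [chainA, if_pos hc]
      simp only [List.length_cons]
      rw [show i + 1 + 1 + (chainA y ys).length = i + 1 + ((chainA y ys).length + 1) by omega]
    · -- break at i+1: the chain is empty
      have hP : (s.getD (i+1) 0 ≠ s.getD ((i+1)-1) 0 + 1) := by
        rw [show i + 1 - 1 = i by omega, hy, hx]
        exact fun he => hc he
      have hch : chainA x (y :: ys) = [] := by simp [chainA, hc]
      rw [hch]
      simp only [List.length_nil, Nat.add_zero]
      rw [if_pos (by omega)]
      simp only [brk, hrange, List.filter_cons]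
      rw [if_pos (by simpa using hP)]
      simp

-- the B-side fold over zipped break pairs equals the fold over the maximal runs
lemma zip_fold (s : List Int) : ∀ (m i : Nat) (x : Int) (xs : List Int)
    (d : PySem.Dict Int (List (List Int))),
    s.length - i = m → s.drop i = x :: xs →
    ((i :: brk s i).zip (brk s i)).foldl
      (fun d p =>
        if 2 ≤ p.2 - p.1 then
          d.modify ((p.2 - p.1 : Nat) : Int) [] (· ++ [(s.drop p.1).take (p.2 - p.1)])
        else d) d
    = (runsR i (s.drop i)).foldl stepR d := by
  intro m
  induction m using Nat.strong_induction_on with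
  | _ m ihm =>
    intro i x xs d hm h
    have hi : i < s.length := by
      by_contra hle
      rw [List.drop_eq_nil_of_le (by omega)] at h
      simp at h
    set c := chainA x xs with hc
    have hxs : s.length - i = xs.length + 1 := by
      have h1 := congrArg List.length h
      simp at h1
      omega
    have hcl : c.length ≤ xs.length := hc ▸ chainA_length_le x xs
    have hci : i + 1 + c.length ≤ s.length := by omega
    have hbrk := brk_eq xs s i x h
    have hslice : (s.drop i).take (c.length + 1) = x :: c := by
      rw [h, List.take_succ_cons]
      rw [hc, chainA_prefix x xs]
      simp
    have hrun : runsR i (s.drop i) =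
        (x :: c) :: runsR (i + 1 + c.length) (s.drop (i + 1 + c.length)) := by
      rw [h, runsR_cons, ← hc]
      congr 1
      rw [← List.drop_drop, ← drop_succ_of_drop s i x xs h]
    by_cases hnext : i + 1 + c.length < s.length
    · rw [if_pos hnext] at hbrk
      obtain ⟨x', xs', hdrop'⟩ : ∃ x' xs', s.drop (i + 1 + c.length) = x' :: xs' := by
        rcases hd : s.drop (i + 1 + c.length) with _ | ⟨a, b⟩
        · exfalso
          have := congrArg List.length hd
          simp at this
          omega
        · exact ⟨a, b, rfl⟩
      rw [hbrk]
      simp only [List.zip_cons_cons, List.foldl_cons]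
      rw [hrun, List.foldl_cons]
      have hstep : (if 2 ≤ i + 1 + c.length - i then
            d.modify ((i + 1 + c.length - i : Nat) : Int) []
              (· ++ [(s.drop i).take (i + 1 + c.length - i)])
          else d) = stepR d (x :: c) := by
        simp only [stepR, show i + 1 + c.length - i = c.length + 1 by omega, hslice,
          List.length_cons]
      rw [hstep]
      exact ihm (s.length - (i + 1 + c.length)) (by omega) (i + 1 + c.length) x' xs'
        (stepR d (x :: c)) rfl hdrop'
    · rw [if_neg hnext] at hbrk
      have hn : i + 1 + c.length = s.length := by omega
      rw [hbrk]
      simp only [List.zip_cons_cons, List.zip_nil_right, List.foldl_cons, List.foldl_nil]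
      rw [hrun, List.foldl_cons]
      rw [hn] at hrun ⊢
      rw [List.drop_length, runsR_nil, List.foldl_nil]
      simp only [stepR, show s.length - i = c.length + 1 by omega, hslice,
        List.length_cons]

-- ===== VERDICT (by name: the statement is the Claim_ definition above) =====
theorem find_consecutive_sequences_py_spec : Claim_equal_find_consecutive_sequences_py := by
  intro s _
  show (outerA s 0 PySem.Dict.empty).items = _
  rw [outerA_eq]
  unfold find_consecutive_sequences_py_alt
  rcases hs : s with _ | ⟨x, xs⟩
  · simp [runsR_nil]
  · rw [if_neg (by simp)]
    have hb : breaksB (x :: xs) = 0 :: brk (x :: xs) 0 := by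
      simp [breaksB, brk]
    simp only [hb, List.tail_cons]
    rw [zip_fold (x :: xs) ((x :: xs).length - 0) 0 x xs PySem.Dict.empty rfl (by simp)]
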